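-- pv_equiv track=rewrite | github.com/zhenzhouwang-cyber/Mocap-studio-Chinese | opera_mocap_tool/analysis/reference_compare.py | _columns_for_markers
-- ===== SOURCE A (Python) =====
-- def _columns_for_markers(all_columns: list[str], marker_names: list[str]) -> list[str]:
--     """选出属于给定 marker 的列（前缀匹配：Marker1_x, Marker1_y -> Marker1）。"""
--     if not marker_names:
--         return list(all_columns)
--     out = []
--     for col in all_columns:
--         for m in marker_names:
--             if col == f"{m}_x" or col == f"{m}_y" or col == f"{m}_z" or col.startswith(m + "_"):
--                 out.append(col)
--                 break
--     return out
-- ===== SOURCE B (Python) =====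
-- def _columns_for_markers(all_columns: list[str], marker_names: list[str]) -> list[str]:
--     """Same selection, but: set of marker names + scan each column's underscore
--     positions and membership-test the prefix, instead of startswith per marker."""
--     if not marker_names:
--         return list(all_columns)
--     marks = set(marker_names)
--     out = []
--     for col in all_columns:
--         for i, ch in enumerate(col):
--             if ch == '_' and col[:i] in marks:
--                 out.append(col)
--                 break
--     return out
-- ===== Notes on version B (the rewrite author's own statement) =====
-- stated objective: faster
-- what changed: Instead of testing every marker with startswith per column, B builds a set of marker names once and, for each column, scans its underscore positions and membership-tests the prefix before each underscore, removing the per-column loop over all markers.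
import Mathlib
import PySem

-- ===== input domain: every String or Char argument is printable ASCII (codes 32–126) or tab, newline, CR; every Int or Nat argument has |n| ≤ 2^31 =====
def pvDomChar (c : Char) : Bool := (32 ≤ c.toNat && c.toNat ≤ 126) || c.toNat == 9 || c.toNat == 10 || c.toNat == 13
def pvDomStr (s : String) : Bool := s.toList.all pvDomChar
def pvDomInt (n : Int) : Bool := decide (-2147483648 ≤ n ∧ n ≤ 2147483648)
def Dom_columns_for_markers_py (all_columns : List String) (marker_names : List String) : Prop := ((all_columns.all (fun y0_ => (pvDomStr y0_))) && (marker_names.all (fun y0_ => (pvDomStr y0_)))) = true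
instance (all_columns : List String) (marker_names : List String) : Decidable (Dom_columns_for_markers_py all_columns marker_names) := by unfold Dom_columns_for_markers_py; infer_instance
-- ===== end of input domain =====

-- B selects the same columns by scanning each column's underscore positions and
-- membership-testing the prefix in a set of marker names (idiomatic restructuring;
-- return value only, no side effects involved).

-- ===== PORT A =====
-- inner 'for m in marker_names: … break' loop of A
def aHit (col : String) : List String → Bool
  | [] => false
  | m :: ms =>
    if col == m ++ "_x" || col == m ++ "_y" || col == m ++ "_z"
        || PySem.Str.startswith col (m ++ "_") then true
    else aHit col ms

def columns_for_markers_py (all_columns : List String) (marker_names : List String) : List String :=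
  if marker_names = [] then all_columns
  else all_columns.foldl (fun out col => if aHit col marker_names then out ++ [col] else out) []

-- ===== PORT B =====
-- inner 'for i, ch in enumerate(col): …' loop of B; col[:i] with enumerate index i ≥ 0 is take i
def bHit (marks : PySem.Set String) (cs : List Char) : Bool :=
  (PySem.List.enumerate cs).any
    (fun p => p.2 == '_' && PySem.Set.contains marks (String.ofList (cs.take p.1.toNat)))

def columns_for_markers_py_alt (all_columns : List String) (marker_names : List String) : List String :=
  if marker_names = [] then all_columns
  else
    let marks := PySem.Set.ofList marker_names
    all_columns.foldl (fun out col => if bHit marks col.toList then out ++ [col] else out) []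

-- ===== PRECONDITION & SPEC =====
def Spec_columns_for_markers_py (all_columns : List String) (marker_names : List String) (out : List String) : Prop := out = columns_for_markers_py_alt all_columns marker_names
instance (all_columns : List String) (marker_names : List String) (out : List String) : Decidable (Spec_columns_for_markers_py all_columns marker_names out) := by unfold Spec_columns_for_markers_py; infer_instance

-- ===== CLAIM (what is proved, stated in full; the proofs are below) =====
def Claim_equal_columns_for_markers_py : Prop := ∀ (all_columns : List String) (marker_names : List String), Dom_columns_for_markers_py all_columns marker_names → Spec_columns_for_markers_py all_columns marker_names (columns_for_markers_py all_columns marker_names)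

-- ===== LEMMAS AND PROOFS =====

theorem take_succ_getElem (l : List Char) (n : Nat) (h : n < l.length) :
    l.take (n+1) = l.take n ++ [l[n]] := by
  rw [List.take_add_one]; simp [List.getElem?_eq_getElem h]

-- A's per-marker test is just 'col starts with m ++ "_"'
theorem aHit_iff (col : String) (ms : List String) :
    aHit col ms = true ↔ ∃ m ∈ ms, (m.toList ++ ['_']) <+: col.toList := by
  induction ms with
  | nil => simp [aHit]
  | cons m ms ih =>
    simp only [aHit]
    split_ifs with h
    · simp only [true_iff, Bool.or_eq_true, beq_iff_eq] at h ⊢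
      refine ⟨m, by simp, ?_⟩
      rcases h with ((h | h) | h) | h
      · refine ⟨['x'], ?_⟩; rw [h]; simp
      · refine ⟨['y'], ?_⟩; rw [h]; simp
      · refine ⟨['z'], ?_⟩; rw [h]; simp
      · rw [PySem.Str.startswith_eq] at h
        have := (PySem.Chars.startswith_iff _ _).mp h
        simpa using this
    · rw [ih]
      simp only [Bool.or_eq_true, beq_iff_eq, not_or] at h
      constructor
      · rintro ⟨m', hm', hp⟩; exact ⟨m', List.mem_cons_of_mem _ hm', hp⟩
      · rintro ⟨m', hm', hp⟩
        rcases List.mem_cons.mp hm' with rfl | hmem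
        · exfalso
          apply h.2
          rw [PySem.Str.startswith_eq]
          exact (PySem.Chars.startswith_iff _ _).mpr (by simpa using hp)
        · exact ⟨m', hmem, hp⟩

theorem bHit_iff (ms : List String) (cs : List Char) :
    bHit (PySem.Set.ofList ms) cs = true ↔
      ∃ k : Nat, k < cs.length ∧ cs[k]? = some '_' ∧ String.ofList (cs.take k) ∈ ms := by
  unfold bHit
  rw [List.any_eq_true]
  constructor
  · rintro ⟨p, hp, hcond⟩
    rcases (PySem.List.mem_enumerate_iff cs 0 p).mp hp with ⟨k, hk, rfl⟩
    simp only [Bool.and_eq_true, beq_iff_eq] at hcond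
    refine ⟨k, hk, ?_, ?_⟩
    · simp [List.getElem?_eq_getElem hk, hcond.1]
    · have := hcond.2
      simp only [zero_add, Int.toNat_natCast] at this
      rw [show PySem.Set.contains (PySem.Set.ofList ms) (String.ofList (cs.take k)) = true ↔
            String.ofList (cs.take k) ∈ PySem.Set.ofList ms from by simp [PySem.Set.contains]] at this
      exact (PySem.Set.mem_ofList _ _).mp this
  · rintro ⟨k, hk, hc, hm⟩
    refine ⟨((0:Int) + k, cs[k]), ?_, ?_⟩
    · exact (PySem.List.mem_enumerate_iff cs 0 _).mpr ⟨k, hk, rfl⟩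
    · simp only [Bool.and_eq_true, beq_iff_eq]
      constructor
      · rw [List.getElem?_eq_getElem hk] at hc
        simpa using Option.some.inj hc
      · simp only [zero_add, Int.toNat_natCast]
        have : String.ofList (cs.take k) ∈ PySem.Set.ofList ms := (PySem.Set.mem_ofList _ _).mpr hm
        simpa [PySem.Set.contains] using this

-- the two existential characterisations coincide
theorem exists_agree (ms : List String) (cs : List Char) :
    (∃ m ∈ ms, (m.toList ++ ['_']) <+: cs) ↔
      ∃ k : Nat, k < cs.length ∧ cs[k]? = some '_' ∧ String.ofList (cs.take k) ∈ ms := by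
  constructor
  · rintro ⟨m, hm, t, ht⟩
    subst ht
    refine ⟨m.toList.length, by simp, ?_, ?_⟩
    · rw [List.append_assoc, List.getElem?_append_right (le_refl _)]
      simp
    · rw [List.append_assoc, List.take_left]
      simp [hm]
  · rintro ⟨k, hk, hc, hm⟩
    refine ⟨String.ofList (cs.take k), hm, ?_⟩
    rw [List.getElem?_eq_getElem hk] at hc
    have hc' : cs[k] = '_' := Option.some.inj hc
    have h1 : (String.ofList (cs.take k)).toList ++ ['_'] = cs.take (k+1) := by
      rw [take_succ_getElem cs k hk, hc']; simp
    rw [h1]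
    exact List.take_prefix _ _

-- per column, the two hit tests agree
theorem hit_agree (ms : List String) (col : String) :
    aHit col ms = bHit (PySem.Set.ofList ms) col.toList := by
  rcases Bool.dichotomy (bHit (PySem.Set.ofList ms) col.toList) with h | h <;> rw [h]
  · rw [← Bool.not_eq_true] at h ⊢
    intro ha
    exact h ((bHit_iff ms col.toList).mpr ((exists_agree ms col.toList).mp ((aHit_iff col ms).mp ha)))
  · exact (aHit_iff col ms).mpr ((exists_agree ms col.toList).mpr ((bHit_iff ms col.toList).mp h))

-- ===== VERDICT (by name: the statement is the Claim_ definition above) =====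
theorem columns_for_markers_py_spec : Claim_equal_columns_for_markers_py := by
  intro all_columns marker_names _
  unfold Spec_columns_for_markers_py columns_for_markers_py columns_for_markers_py_alt
  split_ifs with h
  · rfl
  · rw [PySem.List.foldl_append_if_eq_filter, PySem.List.foldl_append_if_eq_filter]
    congr 1
    apply List.filter_congr
    intro col _
    exact hit_agree marker_names col
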